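-- pv_equiv track=rewrite | github.com/LeonBrianQin/new_androserum | src/androserum/train/losses.py | count_b_positive_pairs
-- ===== SOURCE A (Python) =====
-- from collections import defaultdict
-- from collections.abc import Sequence
--
-- def count_b_positive_pairs(susi_labels: Sequence[str | None]) -> int:
--     """Count cross-method positive pairs contributed by signal B."""
--     groups: dict[str, int] = defaultdict(int)
--     for label in susi_labels:
--         if label is not None:
--             groups[label] += 1
--     total = 0
--     for count in groups.values():
--         if count >= 2:
--             total += count * (count - 1) // 2
--     return total
-- ===== SOURCE B (Python) =====
-- def count_b_positive_pairs(susi_labels):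
--     """Count cross-method positive pairs contributed by signal B."""
--     seen = {}
--     total = 0
--     for label in susi_labels:
--         if label is not None:
--             total += seen.get(label, 0)
--             seen[label] = seen.get(label, 0) + 1
--     return total
-- ===== Notes on version B (the rewrite author's own statement) =====
-- stated objective: alternative
-- what changed: Single pass accumulating, for each non-null label, the number of its earlier occurrences (seen.get(label,0)), instead of building a full counter first and then summing c*(c-1)//2 over a second loop.
import Mathlib
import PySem

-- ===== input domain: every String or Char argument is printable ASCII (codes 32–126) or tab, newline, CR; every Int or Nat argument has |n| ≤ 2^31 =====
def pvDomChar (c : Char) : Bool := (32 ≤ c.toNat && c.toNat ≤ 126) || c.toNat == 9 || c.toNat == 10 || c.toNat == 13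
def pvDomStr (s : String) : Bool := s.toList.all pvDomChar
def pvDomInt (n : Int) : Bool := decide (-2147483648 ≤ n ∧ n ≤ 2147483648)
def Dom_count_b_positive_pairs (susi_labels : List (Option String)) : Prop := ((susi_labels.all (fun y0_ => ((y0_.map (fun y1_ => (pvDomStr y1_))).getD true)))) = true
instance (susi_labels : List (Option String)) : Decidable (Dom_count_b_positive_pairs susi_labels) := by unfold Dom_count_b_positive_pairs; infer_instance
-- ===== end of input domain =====

-- B replaces A's two-phase count-then-combine (counter dict, then sum of c*(c-1)//2) by a
-- single pass that adds, per non-null label, the number of its earlier occurrences.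


-- ===== PORT A =====
def count_b_positive_pairs (susi_labels : List (Option String)) : Int :=
  let groups : PySem.Dict String Int :=
    susi_labels.foldl (fun d label =>
      match label with
      | some s => d.modify s 0 (· + 1)
      | none => d) PySem.Dict.empty
  groups.values.foldl (fun total count =>
    if 2 ≤ count then total + PySem.Int.floordiv (count * (count - 1)) 2 else total) 0

-- ===== PORT B =====
def count_b_positive_pairs_alt (susi_labels : List (Option String)) : Int :=
  (susi_labels.foldl (fun (st : PySem.Dict String Int × Int) label =>
    match label with
    | some s => (st.1.insert s (st.1.getD s 0 + 1), st.2 + st.1.getD s 0)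
    | none => st) (PySem.Dict.empty, 0)).2

-- ===== PRECONDITION & SPEC =====
def Spec_count_b_positive_pairs (susi_labels : List (Option String)) (out : Int) : Prop := out = count_b_positive_pairs_alt susi_labels
instance (susi_labels : List (Option String)) (out : Int) : Decidable (Spec_count_b_positive_pairs susi_labels out) := by unfold Spec_count_b_positive_pairs; infer_instance

-- ===== CLAIM (what is proved, stated in full; the proofs are below) =====
def Claim_equal_count_b_positive_pairs : Prop := ∀ (susi_labels : List (Option String)), Dom_count_b_positive_pairs susi_labels → Spec_count_b_positive_pairs susi_labels (count_b_positive_pairs susi_labels)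

-- ===== LEMMAS AND PROOFS =====

def pvF (c : Int) : Int := if 2 ≤ c then PySem.Int.floordiv (c * (c - 1)) 2 else 0

def pvS (xs : List String) : Int :=
  ((PySem.Set.ofList xs).map (fun k => pvF ((xs.count k : Int)))).sum

lemma pv_foldA (ls : List (Option String)) (d : PySem.Dict String Int) :
    ls.foldl (fun d label =>
      match label with
      | some s => d.modify s 0 (· + 1)
      | none => d) d
    = (ls.filterMap id).foldl (fun d x => d.modify x 0 (· + 1)) d := by
  induction ls generalizing d with
  | nil => rfl
  | cons h t ih => cases h <;> simp [List.filterMap, ih]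

lemma pv_foldB (ls : List (Option String)) (st : PySem.Dict String Int × Int) :
    ls.foldl (fun (st : PySem.Dict String Int × Int) label =>
      match label with
      | some s => (st.1.insert s (st.1.getD s 0 + 1), st.2 + st.1.getD s 0)
      | none => st) st
    = (ls.filterMap id).foldl
        (fun (st : PySem.Dict String Int × Int) s =>
          (st.1.insert s (st.1.getD s 0 + 1), st.2 + st.1.getD s 0)) st := by
  induction ls generalizing st with
  | nil => rfl
  | cons h t ih => cases h <;> simp [List.filterMap, ih]

lemma pv_foldl_if_to_sum (l : List Int) (a : Int) :
    l.foldl (fun total count =>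
      if 2 ≤ count then total + PySem.Int.floordiv (count * (count - 1)) 2 else total) a
    = a + (l.map pvF).sum := by
  induction l generalizing a with
  | nil => simp
  | cons c t ih =>
    simp only [List.foldl_cons, List.map_cons, List.sum_cons, ih, pvF]
    split <;> ring

lemma pv_fd_half (n t : Int) (h : n * (n - 1) = t + t) :
    PySem.Int.floordiv (n * (n - 1)) 2 = t := by
  rw [PySem.Int.floordiv_eq_iff_of_pos (by norm_num)]
  omega

lemma pv_fstep (n : Int) (hn : 0 ≤ n) : pvF (n + 1) = pvF n + n := by
  rcases Int.even_mul_succ_self n with ⟨t1, ht1⟩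
  rcases Int.even_mul_succ_self (n - 1) with ⟨t2, ht2⟩
  have h1 : (n + 1) * ((n + 1) - 1) = t1 + t1 := by linarith [ht1]
  have h2 : n * (n - 1) = t2 + t2 := by linarith [ht2]
  unfold pvF
  rw [pv_fd_half _ _ h1, pv_fd_half _ _ h2]
  rcases lt_or_ge n 2 with h | h
  · interval_cases n <;> split_ifs <;> omega
  · have hlin : t1 = t2 + n := by nlinarith [h1, h2]
    rw [if_pos (by omega : (2:Int) ≤ n + 1), if_pos h]
    omega

lemma pv_sum_map_update (L : List String) (x : String) (u v : String → Int) (δ : Int)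
    (hnd : L.Nodup) (hx : x ∈ L)
    (hne : ∀ k ∈ L, k ≠ x → u k = v k) (hux : u x = v x + δ) :
    (L.map u).sum = (L.map v).sum + δ := by
  induction L with
  | nil => cases hx
  | cons h t ih =>
    rcases List.mem_cons.mp hx with rfl | hxt
    · have ht : ∀ k ∈ t, u k = v k := by
        intro k hk
        exact hne k (List.mem_cons_of_mem _ hk)
          (fun hkx => (List.nodup_cons.mp hnd).1 (hkx ▸ hk))
      simp only [List.map_cons, List.sum_cons, hux, List.map_congr_left ht]
      ring
    · have hhx : h ≠ x := fun he => (List.nodup_cons.mp hnd).1 (he ▸ hxt)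
      simp only [List.map_cons, List.sum_cons,
        ih (List.nodup_cons.mp hnd).2 hxt (fun k hk => hne k (List.mem_cons_of_mem _ hk)),
        hne h (List.mem_cons_self ..) hhx]
      ring

lemma pv_ofList_append (xs : List String) (x : String) :
    PySem.Set.ofList (xs ++ [x]) = PySem.Set.add (PySem.Set.ofList xs) x := by
  rw [PySem.Set.ofList_eq_foldl, PySem.Set.ofList_eq_foldl, List.foldl_append]
  rfl

lemma pv_pvS_step (xs : List String) (x : String) :
    pvS (xs ++ [x]) = pvS xs + (xs.count x : Int) := by
  unfold pvS
  rw [pv_ofList_append]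
  by_cases hx : x ∈ xs
  · have hcont : PySem.Set.contains (PySem.Set.ofList xs) x = true := by
      simp [PySem.Set.contains, PySem.Set.mem_ofList, hx]
    rw [PySem.Set.add, hcont]
    simp only [if_true]
    apply pv_sum_map_update _ x _ _ _ (PySem.Set.nodup_ofList xs)
      ((PySem.Set.mem_ofList ..).mpr hx)
    · intro k _ hk
      have : (xs ++ [x]).count k = xs.count k := by
        simp [List.count_append, (Ne.symm hk : ¬ x = k)]
      rw [this]
    · have : (xs ++ [x]).count x = xs.count x + 1 := by
        simp [List.count_append]
      rw [this]
      push_cast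
      exact pv_fstep _ (by positivity)
  · have hcont : PySem.Set.contains (PySem.Set.ofList xs) x = false := by
      simp [PySem.Set.contains, PySem.Set.mem_ofList, hx]
    rw [PySem.Set.add, hcont]
    simp only [Bool.false_eq_true, if_false, List.map_append, List.sum_append]
    have h0 : xs.count x = 0 := List.count_eq_zero_of_not_mem hx
    have hmap : ∀ k ∈ PySem.Set.ofList xs,
        pvF (((xs ++ [x]).count k : Int)) = pvF ((xs.count k : Int)) := by
      intro k hk
      have hkx : k ≠ x := fun he => hx (he ▸ (PySem.Set.mem_ofList ..).mp hk)
      have : (xs ++ [x]).count k = xs.count k := by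
        simp [List.count_append, (Ne.symm hkx : ¬ x = k)]
      rw [this]
    rw [List.map_congr_left hmap]
    simp [h0, pvF]

lemma pv_main (xs : List String) :
    xs.foldl (fun (st : PySem.Dict String Int × Int) s =>
        (st.1.insert s (st.1.getD s 0 + 1), st.2 + st.1.getD s 0))
      (PySem.Dict.empty, 0)
    = (xs.foldl (fun d x => d.insert x (d.getD x 0 + 1)) PySem.Dict.empty, pvS xs) := by
  induction xs using List.reverseRecOn with
  | nil => simp [pvS, PySem.Set.ofList]
  | append_singleton t x ih =>
    rw [List.foldl_append, List.foldl_append, ih, pv_pvS_step]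
    simp only [List.foldl_cons, List.foldl_nil]
    rw [PySem.Dict.foldl_insert_getD_add_one_eq_counter, PySem.Dict.getD_counter]

-- ===== VERDICT (by name: the statement is the Claim_ definition above) =====
theorem count_b_positive_pairs_spec : Claim_equal_count_b_positive_pairs := by
  intro ls _
  unfold Spec_count_b_positive_pairs count_b_positive_pairs count_b_positive_pairs_alt
  rw [pv_foldA, pv_foldB, pv_main]
  rw [PySem.Dict.foldl_insert_getD_add_one_eq_counter]
  rw [← PySem.Dict.counter_eq_foldl]
  simp only [PySem.Dict.values, PySem.Dict.items_counter, List.map_map, pv_foldl_if_to_sum]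
  simp [pvS, Function.comp_def]
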